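-- pv_equiv track=rewrite | github.com/tnakaicode/jburkardt-python | bvec/bvec.py | i4_bclr
-- ===== SOURCE A (Python) =====
-- def i4_bclr ( i4, pos ):
--
-- #*****************************************************************************80
-- #
-- ## i4_bclr() returns a copy of an I4 in which the POS-th bit is set to 0.
-- #
-- #  Licensing:
-- #
-- #    This code is distributed under the MIT license.
-- #
-- #  Modified:
-- #
-- #    13 June 20145
-- #
-- #  Author:
-- #
-- #    John Burkardt
-- #
-- #  Reference:
-- #
-- #    Military Standard 1753,
-- #    FORTRAN, DoD Supplement To American National Standard X3.9-1978,
-- #    9 November 1978.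
-- #
-- #  Input:
-- #
-- #    integer I4, the integer to be tested.
-- #
-- #    integer POS, the bit position, between 0 and 31.
-- #
-- #  Output:
-- #
-- #    integer VALUE, a copy of I4, but with the POS-th bit
-- #    set to 0.
-- #
--   i4_huge = 2147483647
--
--   value = i4
--
--   if ( pos < 0 ):
--     pass
--   elif ( pos < 31 ):
--
--     sub = 1
--
--     if ( 0 <= i4 ):
--       j = i4
--     else:
--       j = ( i4_huge + i4 ) + 1
--
--     for k in range ( 0, pos ):
--       j = ( j // 2 )
--       sub = sub * 2
--
--     if ( ( j % 2 ) == 1 ):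
--       value = i4 - sub
--
--   elif ( pos == 31 ):
--
--     if ( i4 < 0 ):
--       value = ( i4_huge + i4 ) + 1
--
--   elif ( 31 < pos ):
--
--     value = i4
--
--   return value
-- ===== SOURCE B (Python) =====
-- def i4_bclr(i4, pos):
--     if pos < 0 or 31 < pos:
--         return i4
--     if pos == 31:
--         return i4 + 2147483648 if i4 < 0 else i4
--     p = 2 ** pos
--     return i4 - p if (i4 // p) % 2 == 1 else i4
-- ===== Notes on version B (the rewrite author's own statement) =====
-- stated objective: simpler
-- what changed: Replaces the per-bit loop that halves j and doubles the mask pos times with a direct closed-form test of bit pos via (i4 // 2**pos) % 2, keeping the explicit pos==31 sign-bit branch and the out-of-range pass-through.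
import Mathlib
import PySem

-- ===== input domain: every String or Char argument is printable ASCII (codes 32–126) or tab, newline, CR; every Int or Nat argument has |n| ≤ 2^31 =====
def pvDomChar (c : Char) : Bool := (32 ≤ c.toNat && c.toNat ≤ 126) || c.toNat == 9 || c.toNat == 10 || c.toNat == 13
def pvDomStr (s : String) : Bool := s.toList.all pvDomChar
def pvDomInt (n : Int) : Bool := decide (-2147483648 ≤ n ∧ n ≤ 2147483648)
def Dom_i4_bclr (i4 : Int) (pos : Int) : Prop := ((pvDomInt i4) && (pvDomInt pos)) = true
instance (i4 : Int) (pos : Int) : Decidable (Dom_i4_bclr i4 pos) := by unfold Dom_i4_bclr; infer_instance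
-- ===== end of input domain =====

-- B replaces A's per-bit halving/doubling loop with a closed-form parity test of bit pos (simpler; same values).

-- ===== PORT A =====
def i4_bclr (i4 : Int) (pos : Int) : Int :=
  let i4_huge : Int := 2147483647
  let value := i4
  if pos < 0 then value
  else if pos < 31 then
    let j : Int := if 0 ≤ i4 then i4 else (i4_huge + i4) + 1
    -- for k in range(0, pos): j = j // 2; sub = sub * 2
    let js := (PySem.List.pyRange 0 pos 1).foldl
      (fun (p : Int × Int) (_ : Int) => (PySem.Int.floordiv p.1 2, p.2 * 2)) (j, 1)
    if PySem.Int.mod js.1 2 == 1 then i4 - js.2 else value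
  else if pos == 31 then
    if i4 < 0 then (i4_huge + i4) + 1 else value
  else value

-- ===== PORT B =====
def i4_bclr_alt (i4 : Int) (pos : Int) : Int :=
  if pos < 0 || 31 < pos then i4
  else if pos == 31 then (if i4 < 0 then i4 + 2147483648 else i4)
  else
    let p : Int := 2 ^ pos.toNat  -- p = 2 ** pos; toNat exact: this branch has 0 ≤ pos
    if PySem.Int.mod (PySem.Int.floordiv i4 p) 2 == 1 then i4 - p else i4

-- ===== PRECONDITION & SPEC =====
def Spec_i4_bclr (i4 : Int) (pos : Int) (out : Int) : Prop := out = i4_bclr_alt i4 pos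
instance (i4 : Int) (pos : Int) (out : Int) : Decidable (Spec_i4_bclr i4 pos out) := by unfold Spec_i4_bclr; infer_instance

-- ===== CLAIM (what is proved, stated in full; the proofs are below) =====
def Claim_equal_i4_bclr : Prop := ∀ (i4 : Int) (pos : Int), Dom_i4_bclr i4 pos → Spec_i4_bclr i4 pos (i4_bclr i4 pos)

-- ===== LEMMAS AND PROOFS =====

-- A's loop halves j and doubles sub once per element; only the length matters.
theorem pvLoopEq (l : List Int) : ∀ (j s : Int),
    l.foldl (fun (p : Int × Int) (_ : Int) => (PySem.Int.floordiv p.1 2, p.2 * 2)) (j, s)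
      = (PySem.Int.floordiv j (2 ^ l.length), s * 2 ^ l.length) := by
  induction l with
  | nil =>
      intro j s
      simp only [List.foldl_nil, List.length_nil, pow_zero, mul_one]
      rw [PySem.Int.floordiv_eq_ediv_of_pos (show (0:Int) < 1 by norm_num), Int.ediv_one]
  | cons a t ih =>
      intro j s
      simp only [List.foldl_cons, ih, List.length_cons, Prod.mk.injEq]
      constructor
      · rw [PySem.Int.floordiv_eq_ediv_of_pos (by norm_num : (0:Int) < 2),
            PySem.Int.floordiv_eq_ediv_of_pos (by positivity : (0:Int) < 2 ^ t.length),
            PySem.Int.floordiv_eq_ediv_of_pos (by positivity : (0:Int) < 2 ^ (t.length + 1))]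
        rw [Int.ediv_ediv_of_nonneg (by norm_num : (0:Int) ≤ 2)]
        ring_nf
      · ring

-- adding 2^31 does not change the parity of bit pos when pos < 31
theorem pvParity (i4 : Int) (n : Nat) (hn : n < 31) :
    PySem.Int.mod (PySem.Int.floordiv (i4 + 2147483648) (2 ^ n)) 2
      = PySem.Int.mod (PySem.Int.floordiv i4 (2 ^ n)) 2 := by
  have hp : (0:Int) < 2 ^ n := by positivity
  rw [PySem.Int.floordiv_eq_ediv_of_pos hp, PySem.Int.floordiv_eq_ediv_of_pos hp,
      PySem.Int.mod_eq_emod_of_pos (by norm_num), PySem.Int.mod_eq_emod_of_pos (by norm_num)]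
  have h31 : (2147483648 : Int) = 2 ^ n * (2 * 2 ^ (30 - n)) := by
    have : (2147483648 : Int) = 2 ^ 31 := by norm_num
    rw [this, ← pow_succ']
    rw [← pow_add]
    congr 1
    omega
  rw [h31, Int.add_mul_ediv_left _ _ (by positivity : (2:Int)^n ≠ 0)]
  omega

theorem pvLenRange (pos : Int) (h : 0 ≤ pos) : (PySem.List.pyRange 0 pos 1).length = pos.toNat := by
  rw [PySem.List.length_pyRange_one]; omega

-- ===== VERDICT (by name: the statement is the Claim_ definition above) =====
theorem i4_bclr_spec : Claim_equal_i4_bclr := by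
  intro i4 pos _
  unfold Spec_i4_bclr i4_bclr i4_bclr_alt
  by_cases h0 : pos < 0
  · have hb : (pos < 0 || 31 < pos) = true := by
      simp only [Bool.or_eq_true, decide_eq_true_eq]; omega
    simp [h0]

  · by_cases h31 : pos < 31
    · have hb : (pos < 0 || 31 < pos) = false := by
        simp only [Bool.or_eq_false_iff, decide_eq_false_iff_not]; omega
      have hne : (pos == 31) = false := by simp; omega
      simp only [if_neg h0, if_pos h31, hb, Bool.false_eq_true, if_false, hne]
      rw [pvLoopEq, pvLenRange pos (by omega)]
      by_cases hneg : 0 ≤ i4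
      · simp [hneg]
      · have : ((2147483647 : Int) + i4) + 1 = i4 + 2147483648 := by ring
        simp only [if_neg hneg, this]
        rw [pvParity i4 pos.toNat (by omega)]
        simp
    · by_cases heq : pos = 31
      · subst heq; norm_num
        split_ifs <;> omega
      · have : (pos < 0 || 31 < pos) = true := by
          simp only [Bool.or_eq_true, decide_eq_true_eq]; omega
        simp only [if_neg h0, if_neg h31, this, if_true]
        have : (pos == 31) = false := by simp; omega
        simp [this]
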